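-- pv_equiv track=rewrite | github.com/IGemThessaloniki/Thessaloniki | Package/ViennaRNA/ViennaRNA.py | check_restriction
-- ===== SOURCE A (Python) =====
-- def check_restriction(part):
--     result = "GOOD There is no restriction site.\n"
--     i=0
--     while(i<len(part)):
--         if(part.find("GAAUUC")!=-1 or part.find("UCUAGA")!=-1 or part.find("ACUAGU")!=-1 or part.find("CUGCAG")!=-1 or part.find("GCGGCCGC")!=-1):
--             result= "BAD There is a restriction site.\n"
--             break
--         i+=1
--         part=part[i:len(part)-1]
--
--     return result
-- ===== SOURCE B (Python) =====
-- def check_restriction(part):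
--     patterns = ("GAAUUC", "UCUAGA", "ACUAGU", "CUGCAG", "GCGGCCGC")
--     if any(p in part for p in patterns):
--         return "BAD There is a restriction site.\n"
--     return "GOOD There is no restriction site.\n"
-- ===== Notes on version B (the rewrite author's own statement) =====
-- stated objective: simpler
-- what changed: A's while-loop repeatedly re-scans ever-shorter slices although a slice can never contain a pattern the full string lacked; B drops the loop and does a single any-membership test over the five patterns.
import Mathlib
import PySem

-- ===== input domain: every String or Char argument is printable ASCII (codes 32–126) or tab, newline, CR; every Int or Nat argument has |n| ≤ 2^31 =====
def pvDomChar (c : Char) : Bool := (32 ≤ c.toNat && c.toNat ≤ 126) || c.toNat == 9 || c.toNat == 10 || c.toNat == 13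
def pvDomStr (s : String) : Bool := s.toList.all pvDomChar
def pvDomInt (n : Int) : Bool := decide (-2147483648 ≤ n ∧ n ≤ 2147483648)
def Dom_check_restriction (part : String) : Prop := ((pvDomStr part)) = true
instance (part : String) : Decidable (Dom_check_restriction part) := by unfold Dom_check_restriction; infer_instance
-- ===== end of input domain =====

-- B replaces A's quadratic slice-and-rescan while-loop with a single membership test over the five patterns.


-- ===== PORT A =====
-- A: sets result GOOD, then while i < len(part): if any pattern found break with BAD,
-- else i += 1 and part = part[i:len(part)-1].  Fuel (length+1) makes the loop total;
-- it exceeds the number of iterations the Python loop can make.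
def checkLoopA : Nat → Int → List Char → String
  | 0, _, _ => "GOOD There is no restriction site.\n"
  | fuel+1, i, part =>
    if i < (part.length : Int) then
      if PySem.Chars.find part "GAAUUC".toList ≠ -1 ∨ PySem.Chars.find part "UCUAGA".toList ≠ -1 ∨
         PySem.Chars.find part "ACUAGU".toList ≠ -1 ∨ PySem.Chars.find part "CUGCAG".toList ≠ -1 ∨
         PySem.Chars.find part "GCGGCCGC".toList ≠ -1 then
        "BAD There is a restriction site.\n"
      else
        checkLoopA fuel (i+1) (PySem.List.slice part (some (i+1)) (some ((part.length : Int) - 1)))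
    else "GOOD There is no restriction site.\n"

def check_restriction (part : String) : String :=
  checkLoopA (part.toList.length + 1) 0 part.toList

-- ===== PORT B =====
def check_restriction_alt (part : String) : String :=
  if ["GAAUUC", "UCUAGA", "ACUAGU", "CUGCAG", "GCGGCCGC"].any (fun p => PySem.Str.isIn p part) then
    "BAD There is a restriction site.\n"
  else
    "GOOD There is no restriction site.\n"

-- ===== PRECONDITION & SPEC =====
def Spec_check_restriction (part : String) (out : String) : Prop := out = check_restriction_alt part
instance (part : String) (out : String) : Decidable (Spec_check_restriction part out) := by unfold Spec_check_restriction; infer_instance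

-- ===== CLAIM (what is proved, stated in full; the proofs are below) =====
def Claim_equal_check_restriction : Prop := ∀ (part : String), Dom_check_restriction part → Spec_check_restriction part (check_restriction part)

-- ===== LEMMAS AND PROOFS =====

-- No pattern in part → no pattern in any slice of part (slice is an infix), so the loop
-- returns GOOD for every fuel.
lemma pv_slice_infix (xs : List Char) (a b : Int) :
    PySem.List.slice xs (some a) (some b) <:+: xs := by
  simp [PySem.List.slice]
  exact ((List.take_prefix _ _).isInfix).trans (List.drop_suffix _ _).isInfix

lemma pv_loop_good (fuel : Nat) (i : Int) (part : List Char)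
    (h : ∀ p ∈ ["GAAUUC", "UCUAGA", "ACUAGU", "CUGCAG", "GCGGCCGC"],
        ¬ p.toList <:+: part) :
    checkLoopA fuel i part = "GOOD There is no restriction site.\n" := by
  induction fuel generalizing i part with
  | zero => rfl
  | succ n ih =>
    simp only [checkLoopA]
    split
    · rw [if_neg, ih]
      · intro p hp hinf
        exact h p hp (hinf.trans (pv_slice_infix part _ _))
      · push Not
        simp only [PySem.Chars.find_eq_neg_one_iff]
        refine ⟨h _ (by simp), h _ (by simp), h _ (by simp), h _ (by simp), h _ (by simp)⟩
    · rfl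

-- ===== VERDICT (by name: the statement is the Claim_ definition above) =====
theorem check_restriction_spec : Claim_equal_check_restriction := by
  intro part _
  unfold Spec_check_restriction check_restriction check_restriction_alt
  by_cases h : ∃ p ∈ ["GAAUUC", "UCUAGA", "ACUAGU", "CUGCAG", "GCGGCCGC"],
      p.toList <:+: part.toList
  · obtain ⟨p, hp, hinf⟩ := h
    have hlen : (0 : Int) < part.toList.length := by
      have h6 : 0 < p.toList.length := by fin_cases hp <;> decide
      have := hinf.sublist.length_le
      omega
    rw [if_pos]
    · simp only [checkLoopA, if_pos hlen]
      rw [if_pos]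
      fin_cases hp <;>
        simp_all [PySem.Chars.find_ne_neg_one_iff]
    · simp only [List.any_eq_true]
      exact ⟨p, hp, by rwa [PySem.Str.isIn_iff_infix]⟩
  · push Not at h
    rw [if_neg, pv_loop_good _ _ _ h]
    simp only [List.any_eq_true, not_exists, not_and]
    intro p hp hc
    exact h p hp (by rwa [PySem.Str.isIn_iff_infix] at hc)
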